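-- pv_equiv track=rewrite | github.com/Kawser-nerd/CLCDSA | Source Codes/AtCoder/arc001/C/4495746.py | check
-- ===== SOURCE A (Python) =====
-- def check(Qss):
--     if max(map(sum, Qss)) > 1:
--         return False
--     if max(map(sum, zip(*Qss))) > 1:
--         return False
--     if max(map(sum, zip(*[[0]*i + Qs + [0]*(7-i) for i, Qs in enumerate(Qss)]))) > 1:
--         return False
--     if max(map(sum, zip(*[[0]*(7-i) + Qs + [0]*i for i, Qs in enumerate(Qss)]))) > 1:
--         return False
--     return True
-- ===== SOURCE B (Python) =====
-- def check(Qss):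
--     # Check each family of lines by direct index arithmetic: rows first,
--     # then columns and the two diagonal directions of the board.
--     if any(sum(r) > 1 for r in Qss):
--         return False
--     n, m = len(Qss), len(Qss[0])
--     return (all(sum(r[j] for r in Qss) <= 1 for j in range(m))
--         and all(sum(Qss[i][k - i] for i in range(n) if 0 <= k - i < m) <= 1
--                 for k in range(n + m - 1))
--         and all(sum(Qss[i][k - (n - 1) + i] for i in range(n) if 0 <= k - (n - 1) + i < m) <= 1
--                 for k in range(n + m - 1)))
-- ===== Notes on version B (the rewrite author's own statement) =====
-- stated objective: alternative
-- what changed: B is a genuinely different decomposition of the same cost: it checks rows first and then computes column and both diagonal sums directly by index arithmetic, instead of A's build-pad-transpose-reduce passes (list padding, zip(*...), map(sum), max); Pre_ excludes the empty grid (A raises) and, when no row sum already exceeds 1, non-board shapes (ragged rows, empty first row, or more than 8 rows, A's padding being sized for an 8-row board) where A raises or its zip-truncation value is an implementation artefact.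
-- outside the precondition, e.g. on check([[0, 1], [0, 1], [0]]): A returns True, B raises IndexError
import Mathlib
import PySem

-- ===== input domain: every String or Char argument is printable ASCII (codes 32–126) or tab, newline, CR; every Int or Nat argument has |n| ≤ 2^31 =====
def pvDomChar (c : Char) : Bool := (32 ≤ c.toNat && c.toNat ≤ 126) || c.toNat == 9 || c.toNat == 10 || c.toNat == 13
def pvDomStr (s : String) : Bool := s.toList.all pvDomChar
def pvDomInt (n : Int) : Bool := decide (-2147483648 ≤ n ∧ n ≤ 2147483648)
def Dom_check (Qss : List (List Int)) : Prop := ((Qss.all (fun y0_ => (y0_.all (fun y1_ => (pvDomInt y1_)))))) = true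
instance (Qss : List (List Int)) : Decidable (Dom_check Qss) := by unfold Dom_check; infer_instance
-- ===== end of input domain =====

-- B replaces A's pad/transpose/reduce passes by direct coordinate sums over rows,
-- columns and the two diagonal families of the board (an alternative decomposition
-- of similar cost; return-value equivalence on Pre_check).

-- ===== PORT A =====

-- hand port of Python's enumerate with a Nat counter (exact: A's enumerate starts at 0, indices are nonnegative)
def enumN {α : Type} : Nat → List α → List (Nat × α)
  | _, [] => []
  | i, a :: t => (i, a) :: enumN (i + 1) t

-- Python max over a list; Python raises ValueError on [], which Pre_check excludes (the 0 is never reached under Pre_)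
def pyMaxI : List Int → Int
  | [] => 0
  | h :: t => t.foldl max h

-- zip(*xss): take heads while every row is nonempty (exactly Python's zip truncation)
def pyZipT (xss : List (List Int)) : List (List Int) :=
  if xss.isEmpty then []
  else if xss.all (fun r => !r.isEmpty) then
    (xss.map (fun r => r.headD 0)) :: pyZipT (xss.map List.tail)
  else []
termination_by (xss.headD []).length
decreasing_by
  cases xss with
  | nil => simp at *
  | cons a t =>
    rename_i h1 h2
    simp only [List.all_cons, Bool.and_eq_true, Bool.not_eq_eq_eq_not, Bool.not_true,
      List.isEmpty_eq_false_iff] at h2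
    simp only [List.headD_cons]
    cases a with
    | nil => exact absurd rfl h2.1
    | cons x xs => simp

-- [[0]*i + Qs + [0]*(7-i) for i, Qs in enumerate(Qss)]  (Python [0]*(7-i) is empty for i>7: Nat subtraction is exact here)
def padL (Qss : List (List Int)) : List (List Int) :=
  (enumN 0 Qss).map (fun p => List.replicate p.1 (0 : Int) ++ p.2 ++ List.replicate (7 - p.1) (0 : Int))

-- [[0]*(7-i) + Qs + [0]*i for i, Qs in enumerate(Qss)]
def padR (Qss : List (List Int)) : List (List Int) :=
  (enumN 0 Qss).map (fun p => List.replicate (7 - p.1) (0 : Int) ++ p.2 ++ List.replicate p.1 (0 : Int))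

def check (Qss : List (List Int)) : Bool :=
  if 1 < pyMaxI (Qss.map List.sum) then false
  else if 1 < pyMaxI ((pyZipT Qss).map List.sum) then false
  else if 1 < pyMaxI ((pyZipT (padL Qss)).map List.sum) then false
  else if 1 < pyMaxI ((pyZipT (padR Qss)).map List.sum) then false
  else true

-- ===== PORT B =====

-- Python len(Qss[0]) raises IndexError on []; that point is outside Pre_check (headD [] is exact elsewhere)
-- In the diagonal guards, k and i are nonnegative, so Python's int test 0 <= k-i < m is
-- exactly the Nat test i ≤ k ∧ k - i < m (and likewise for the anti-diagonal); exact.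
def check_alt (Qss : List (List Int)) : Bool :=
  if Qss.any (fun r => decide (1 < r.sum)) then false
  else
    let n := Qss.length
    let m := (Qss.headD []).length
    ((List.range m).all (fun j => decide ((Qss.map (fun r => r.getD j 0)).sum ≤ 1))) &&
    ((List.range (n + m - 1)).all (fun k =>
      decide ((((List.range n).filter (fun i => decide (i ≤ k ∧ k - i < m))).map
        (fun i => (Qss.getD i []).getD (k - i) 0)).sum ≤ 1))) &&
    ((List.range (n + m - 1)).all (fun k =>
      decide ((((List.range n).filter (fun i => decide (n - 1 ≤ k + i ∧ k + i - (n - 1) < m))).map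
        (fun i => (Qss.getD i []).getD (k + i - (n - 1)) 0)).sum ≤ 1)))

-- ===== PRECONDITION & SPEC =====

-- Pre_check excludes the empty grid (A raises ValueError) and — only when no row sum already
-- exceeds 1 — grids that are not a board shape this function is written for (ragged rows, an
-- empty first row, or more than 8 rows, A's padding being sized for an 8-row board), where A
-- raises or its zip-truncation value is an implementation artefact.
def Pre_check (Qss : List (List Int)) : Prop :=
  Qss ≠ [] ∧
    ((Qss.length ≤ 8 ∧ (∀ r ∈ Qss, r.length = (Qss.headD []).length) ∧ Qss.headD [] ≠ []) ∨
     (∃ r ∈ Qss, 1 < r.sum))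
instance (Qss : List (List Int)) : Decidable (Pre_check Qss) := by unfold Pre_check; infer_instance

def pvWitness_check : List (List Int) := [[1, 0], [0, 1]]

def Spec_check (Qss : List (List Int)) (out : Bool) : Prop := out = check_alt Qss
instance (Qss : List (List Int)) (out : Bool) : Decidable (Spec_check Qss out) := by unfold Spec_check; infer_instance

-- ===== CLAIM (what is proved, stated in full; the proofs are below) =====
def Claim_equal_check : Prop := ∀ (Qss : List (List Int)), Dom_check Qss → Pre_check Qss → Spec_check Qss (check Qss)

-- ===== LEMMAS AND PROOFS =====

-- proof-side abbreviations for the column/diagonal sums both ports are reduced to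
def colSum (Qss : List (List Int)) (j : Nat) : Int :=
  (Qss.map (fun r => r.getD j 0)).sum

def diagSum (Qss : List (List Int)) (k : Nat) : Int :=
  (((enumN 0 Qss).filter (fun p => decide (p.1 ≤ k ∧ k < p.1 + p.2.length))).map
    (fun p => p.2.getD (k - p.1) 0)).sum

def antiSum (Qss : List (List Int)) (k : Nat) : Int :=
  (((enumN 0 Qss).filter (fun p => decide (7 - p.1 ≤ k ∧ k < (7 - p.1) + p.2.length))).map
    (fun p => p.2.getD (k - (7 - p.1)) 0)).sum

def bDiagS (Qss : List (List Int)) (n m k : Nat) : Int :=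
  (((List.range n).filter (fun i => decide (i ≤ k ∧ k - i < m))).map
    (fun i => (Qss.getD i []).getD (k - i) 0)).sum

def bAntiS (Qss : List (List Int)) (n m k : Nat) : Int :=
  (((List.range n).filter (fun i => decide (n - 1 ≤ k + i ∧ k + i - (n - 1) < m))).map
    (fun i => (Qss.getD i []).getD (k + i - (n - 1)) 0)).sum

def minND : List Nat → Nat
  | [] => 0
  | h :: t => t.foldl min h

theorem foldl_max_lt_iff (t : List Int) (h : Int) :
    1 < t.foldl max h ↔ (1 < h ∨ ∃ x ∈ t, 1 < x) := by
  induction t generalizing h with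
  | nil => simp
  | cons a t ih =>
    simp only [List.foldl_cons, ih, lt_max_iff, List.mem_cons]
    constructor
    · rintro ((h1 | h1) | ⟨x, hx, h1⟩)
      · exact Or.inl h1
      · exact Or.inr ⟨a, Or.inl rfl, h1⟩
      · exact Or.inr ⟨x, Or.inr hx, h1⟩
    · rintro (h1 | ⟨x, (rfl | hx), h1⟩)
      · exact Or.inl (Or.inl h1)
      · exact Or.inl (Or.inr h1)
      · exact Or.inr ⟨x, hx, h1⟩

theorem pyMaxI_lt_iff (xs : List Int) (hne : xs ≠ []) :
    1 < pyMaxI xs ↔ ∃ x ∈ xs, 1 < x := by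
  cases xs with
  | nil => exact absurd rfl hne
  | cons h t =>
    simp only [pyMaxI, foldl_max_lt_iff, List.mem_cons]
    constructor
    · rintro (h1 | ⟨x, hx, h1⟩)
      · exact ⟨h, Or.inl rfl, h1⟩
      · exact ⟨x, Or.inr hx, h1⟩
    · rintro ⟨x, (rfl | hx), h1⟩
      · exact Or.inl h1
      · exact Or.inr ⟨x, hx, h1⟩

theorem foldl_min_mem' (t : List Nat) (h : Nat) : t.foldl min h = h ∨ t.foldl min h ∈ t := by
  induction t generalizing h with
  | nil => simp
  | cons a t ih =>
    simp only [List.foldl_cons, List.mem_cons]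
    rcases ih (min h a) with h1 | h1
    · rcases min_choice h a with he | he
      · exact Or.inl (h1.trans he)
      · exact Or.inr (Or.inl (h1.trans he))
    · exact Or.inr (Or.inr h1)

theorem minND_mem (xs : List Nat) (hne : xs ≠ []) : minND xs ∈ xs := by
  cases xs with
  | nil => exact absurd rfl hne
  | cons h t =>
    simp only [minND, List.mem_cons]
    rcases foldl_min_mem' t h with h1 | h1
    · exact Or.inl h1
    · exact Or.inr h1

theorem foldl_min_sub1 (t : List Nat) (h : Nat) :
    (t.map (· - 1)).foldl min (h - 1) = t.foldl min h - 1 := by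
  induction t generalizing h with
  | nil => simp
  | cons a t ih =>
    simp only [List.map_cons, List.foldl_cons]
    rw [show min (h - 1) (a - 1) = min h a - 1 by omega, ih]

theorem map_length_tail (xss : List (List Int)) :
    (xss.map List.tail).map List.length = (xss.map List.length).map (· - 1) := by
  simp [List.map_map, Function.comp]

theorem getD_tail (r : List Int) (j : Nat) : r.tail.getD j 0 = r.getD (j + 1) 0 := by
  cases r <;> simp [List.getD]

theorem getD_head (r : List Int) : r.headD 0 = r.getD 0 0 := by
  cases r <;> simp [List.getD]

theorem foldl_min_le' (t : List Nat) (h : Nat) : t.foldl min h ≤ h ∧ ∀ x ∈ t, t.foldl min h ≤ x := by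
  induction t generalizing h with
  | nil => simp
  | cons a t ih =>
    simp only [List.foldl_cons, List.mem_cons]
    refine ⟨(ih (min h a)).1.trans (Nat.min_le_left _ _), ?_⟩
    rintro x (rfl | hx)
    · exact (ih (min h x)).1.trans (Nat.min_le_right _ _)
    · exact (ih (min h a)).2 x hx

theorem minND_le (xs : List Nat) (x : Nat) (hx : x ∈ xs) : minND xs ≤ x := by
  cases xs with
  | nil => simp at hx
  | cons h t =>
    simp only [List.mem_cons] at hx
    rcases hx with rfl | hx
    · exact (foldl_min_le' t x).1
    · exact (foldl_min_le' t h).2 x hx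

theorem zipT_eq (n : Nat) : ∀ (xss : List (List Int)), minND (xss.map List.length) = n →
    pyZipT xss = (List.range n).map (fun j => xss.map (fun r => r.getD j 0)) := by
  induction n with
  | zero =>
    intro xss hmin
    rw [pyZipT]
    cases xss with
    | nil => simp
    | cons a t =>
      have hmem := minND_mem (((a :: t).map List.length)) (by simp)
      rw [hmin] at hmem
      simp only [List.mem_map] at hmem
      obtain ⟨r, hr, hr0⟩ := hmem
      have hre : r = [] := List.eq_nil_of_length_eq_zero hr0
      have hcond : ¬ ((a :: t).all (fun r => !r.isEmpty) = true) := by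
        simp only [List.all_eq_true, Bool.not_eq_eq_eq_not, Bool.not_true,
          List.isEmpty_eq_false_iff, not_forall]
        exact ⟨r, hr, by simp [hre]⟩
      rw [if_neg (by simp), if_neg hcond]
      simp
  | succ n ih =>
    intro xss hmin
    have hne : xss ≠ [] := by
      rintro rfl; simp [minND] at hmin
    have hall : ∀ r ∈ xss, r ≠ [] := by
      intro r hr hre
      have : minND (xss.map List.length) ≤ 0 := by
        apply minND_le
        simp only [List.mem_map]
        exact ⟨r, hr, by simp [hre]⟩
      omega
    rw [pyZipT]
    rw [if_neg (by simpa [List.isEmpty_iff] using hne)]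
    rw [if_pos (by
      simp only [List.all_eq_true, Bool.not_eq_eq_eq_not, Bool.not_true,
        List.isEmpty_eq_false_iff]
      exact hall)]
    have htail : minND ((xss.map List.tail).map List.length) = n := by
      rw [map_length_tail]
      have hsub : minND (xss.map List.length) - 1 = n := by omega
      rw [← hsub]
      cases h : xss.map List.length with
      | nil => simp [h, minND] at hmin
      | cons a t => simp only [minND, List.map_cons, foldl_min_sub1]
    rw [ih (xss.map List.tail) htail]
    rw [List.range_succ_eq_map]
    simp only [List.map_cons, List.map_map]
    congr 1
    · exact List.map_congr_left (fun r _ => getD_head r)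
    · apply List.map_congr_left
      intro j _
      simp only [Function.comp_def]
      apply List.map_congr_left
      intro r _
      exact getD_tail r j

theorem sum_map_eq_sum_filter {α : Type} (l : List α) (f : α → Int) (p : α → Bool)
    (h : ∀ x ∈ l, p x = false → f x = 0) :
    (l.map f).sum = ((l.filter p).map f).sum := by
  induction l with
  | nil => simp
  | cons a t ih =>
    simp only [List.map_cons, List.sum_cons, List.filter_cons]
    by_cases hp : p a = true
    · simp only [hp, if_true, List.map_cons, List.sum_cons]
      rw [ih (fun x hx => h x (List.mem_cons_of_mem a hx))]
    · rw [h a (List.mem_cons_self) (by simpa using hp)]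
      simp only [Bool.not_eq_true] at hp
      simp only [hp, Bool.false_eq_true, if_false]
      rw [ih (fun x hx => h x (List.mem_cons_of_mem a hx))]
      omega

theorem getD_pad (i m : Nat) (r : List Int) (k : Nat) :
    (List.replicate i (0 : Int) ++ r ++ List.replicate m (0 : Int)).getD k 0 =
      if i ≤ k ∧ k < i + r.length then r.getD (k - i) 0 else 0 := by
  rw [List.append_assoc, List.getD_eq_getElem?_getD]
  by_cases h1 : k < i
  · rw [if_neg (by omega), List.getElem?_append_left (by simpa using h1)]
    simp [h1]
  · push Not at h1
    rw [List.getElem?_append_right (by simpa using h1)]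
    simp only [List.length_replicate]
    by_cases h2 : k - i < r.length
    · rw [if_pos ⟨h1, by omega⟩, List.getElem?_append_left h2, ← List.getD_eq_getElem?_getD]
    · rw [if_neg (by omega), List.getElem?_append_right (by omega)]
      rcases Nat.lt_or_ge (k - i - r.length) m with h3 | h3 <;>
        simp [h3]

theorem enumN_ne_nil {α : Type} (s : Nat) (xs : List α) (h : xs ≠ []) : enumN s xs ≠ [] := by
  cases xs with
  | nil => exact absurd rfl h
  | cons a t => simp [enumN]

theorem padL_lengths (Qss : List (List Int)) :
    (padL Qss).map List.length = (enumN 0 Qss).map (fun p => p.2.length + max p.1 7) := by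
  unfold padL
  rw [List.map_map]
  apply List.map_congr_left
  intro p _
  simp only [Function.comp, List.length_append, List.length_replicate]
  omega

theorem padR_lengths (Qss : List (List Int)) :
    (padR Qss).map List.length = (enumN 0 Qss).map (fun p => p.2.length + max p.1 7) := by
  unfold padR
  rw [List.map_map]
  apply List.map_congr_left
  intro p _
  simp only [Function.comp, List.length_append, List.length_replicate]
  omega

theorem padL_col_sum (Qss : List (List Int)) (k : Nat) :
    ((padL Qss).map (fun r => r.getD k 0)).sum = diagSum Qss k := by
  unfold padL diagSum
  rw [List.map_map]
  have hcong : ∀ p ∈ enumN 0 Qss,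
      ((fun r => r.getD k 0) ∘ fun p : Nat × List Int =>
        List.replicate p.1 (0 : Int) ++ p.2 ++ List.replicate (7 - p.1) (0 : Int)) p =
      (fun p : Nat × List Int =>
        if p.1 ≤ k ∧ k < p.1 + p.2.length then p.2.getD (k - p.1) 0 else 0) p := by
    intro p _
    simp only [Function.comp]
    exact getD_pad p.1 (7 - p.1) p.2 k
  rw [List.map_congr_left hcong]
  rw [sum_map_eq_sum_filter _ _ (fun p => decide (p.1 ≤ k ∧ k < p.1 + p.2.length))
    (by intro x _ hpf; rw [if_neg]; simpa using hpf)]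
  congr 1
  apply List.map_congr_left
  intro p hp
  rw [List.mem_filter] at hp
  rw [if_pos (by simpa using hp.2)]

theorem padR_col_sum (Qss : List (List Int)) (k : Nat) :
    ((padR Qss).map (fun r => r.getD k 0)).sum = antiSum Qss k := by
  unfold padR antiSum
  rw [List.map_map]
  have hcong : ∀ p ∈ enumN 0 Qss,
      ((fun r => r.getD k 0) ∘ fun p : Nat × List Int =>
        List.replicate (7 - p.1) (0 : Int) ++ p.2 ++ List.replicate p.1 (0 : Int)) p =
      (fun p : Nat × List Int =>
        if 7 - p.1 ≤ k ∧ k < (7 - p.1) + p.2.length then p.2.getD (k - (7 - p.1)) 0 else 0) p := by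
    intro p _
    simp only [Function.comp]
    exact getD_pad (7 - p.1) p.1 p.2 k
  rw [List.map_congr_left hcong]
  rw [sum_map_eq_sum_filter _ _ (fun p => decide (7 - p.1 ≤ k ∧ k < (7 - p.1) + p.2.length))
    (by intro x _ hpf; rw [if_neg]; simpa using hpf)]
  congr 1
  apply List.map_congr_left
  intro p hp
  rw [List.mem_filter] at hp
  rw [if_pos (by simpa using hp.2)]

theorem cols_eq (Qss : List (List Int)) :
    (pyZipT Qss).map List.sum =
      (List.range (minND (Qss.map List.length))).map (fun j => colSum Qss j) := by
  rw [zipT_eq (minND (Qss.map List.length)) Qss rfl, List.map_map]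
  apply List.map_congr_left
  intro j _
  simp [colSum]

theorem diags_eq (Qss : List (List Int)) :
    (pyZipT (padL Qss)).map List.sum =
      (List.range (minND ((enumN 0 Qss).map (fun p => p.2.length + max p.1 7)))).map
        (fun k => diagSum Qss k) := by
  rw [zipT_eq _ (padL Qss) (by rw [padL_lengths]), List.map_map]
  apply List.map_congr_left
  intro k _
  simpa using padL_col_sum Qss k

theorem antis_eq (Qss : List (List Int)) :
    (pyZipT (padR Qss)).map List.sum =
      (List.range (minND ((enumN 0 Qss).map (fun p => p.2.length + max p.1 7)))).map
        (fun k => antiSum Qss k) := by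
  rw [zipT_eq _ (padR Qss) (by rw [padR_lengths]), List.map_map]
  apply List.map_congr_left
  intro k _
  simpa using padR_col_sum Qss k

theorem maxI_map_iff {α : Type} (l : List α) (f : α → Int) (hne : l ≠ []) :
    1 < pyMaxI (l.map f) ↔ ¬ ∀ x ∈ l, f x ≤ 1 := by
  rw [pyMaxI_lt_iff _ (by simpa using hne)]
  simp only [List.mem_map, not_forall, not_le]
  constructor
  · rintro ⟨y, ⟨x, hx, rfl⟩, h⟩; exact ⟨x, hx, h⟩
  · rintro ⟨x, hx, h⟩; exact ⟨f x, ⟨x, hx, rfl⟩, h⟩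

-- enumerate as an indexed range
theorem enumN_eq (s : Nat) (xs : List (List Int)) :
    enumN s xs = (List.range xs.length).map (fun i => (s + i, xs.getD i [])) := by
  induction xs generalizing s with
  | nil => simp [enumN]
  | cons a t ih =>
    simp only [enumN, List.length_cons, List.range_succ_eq_map, List.map_cons, List.map_map]
    refine congrArg₂ List.cons (by simp) ?_
    rw [ih (s + 1)]
    apply List.map_congr_left
    intro i _
    simp only [Function.comp_def, List.getD_cons_succ, Prod.mk.injEq]
    exact ⟨by omega, by trivial⟩

theorem getD_mem_of_lt (Qss : List (List Int)) (i : Nat) (h : i < Qss.length) :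
    Qss.getD i [] ∈ Qss := by
  rw [List.getD_eq_getElem?_getD, List.getElem?_eq_getElem h]
  exact List.getElem_mem h

-- under a rectangular grid, A's diagonal-column sum is B's direct diagonal sum
theorem diagSum_eq_bDiagS (Qss : List (List Int)) (m : Nat)
    (hrect : ∀ r ∈ Qss, r.length = m) (k : Nat) :
    diagSum Qss k = bDiagS Qss Qss.length m k := by
  unfold diagSum bDiagS
  rw [enumN_eq, List.filter_map, List.map_map]
  congr 1
  have hfc : ∀ i ∈ List.range Qss.length,
      ((fun p : Nat × List Int => decide (p.1 ≤ k ∧ k < p.1 + p.2.length)) ∘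
        (fun i => ((0 + i : Nat), Qss.getD i []))) i
      = (fun i => decide (i ≤ k ∧ k - i < m)) i := by
    intro i hi
    rw [List.mem_range] at hi
    simp only [Function.comp_def, hrect _ (getD_mem_of_lt Qss i hi), decide_eq_decide]
    omega
  rw [List.filter_congr hfc]
  apply List.map_congr_left
  intro i _
  simp

theorem diagSum_zero (Qss : List (List Int)) (m : Nat)
    (hrect : ∀ r ∈ Qss, r.length = m) (k : Nat) (hk : Qss.length + m - 1 ≤ k) :
    diagSum Qss k = 0 := by
  unfold diagSum
  rw [enumN_eq]
  rw [List.filter_map]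
  have : List.filter ((fun p : Nat × List Int => decide (p.1 ≤ k ∧ k < p.1 + p.2.length)) ∘
      (fun i => ((0 + i : Nat), Qss.getD i []))) (List.range Qss.length) = [] := by
    rw [List.filter_eq_nil_iff]
    intro i hi
    rw [List.mem_range] at hi
    simp only [Function.comp_def, hrect _ (getD_mem_of_lt Qss i hi), decide_eq_true_eq]
    omega
  rw [this]
  simp

-- under a rectangular ≤8-row grid, A's anti-diagonal sum at k'+ (8-n) is B's at k'
theorem antiSum_eq_bAntiS (Qss : List (List Int)) (m : Nat)
    (hrect : ∀ r ∈ Qss, r.length = m) (h8 : Qss.length ≤ 8) (hn : 1 ≤ Qss.length) (k' : Nat) :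
    antiSum Qss (k' + (8 - Qss.length)) = bAntiS Qss Qss.length m k' := by
  unfold antiSum bAntiS
  rw [enumN_eq, List.filter_map, List.map_map]
  have hfc : ∀ i ∈ List.range Qss.length,
      ((fun p : Nat × List Int => decide (7 - p.1 ≤ k' + (8 - Qss.length) ∧
          k' + (8 - Qss.length) < (7 - p.1) + p.2.length)) ∘
        (fun i => ((0 + i : Nat), Qss.getD i []))) i
      = (fun i => decide (Qss.length - 1 ≤ k' + i ∧ k' + i - (Qss.length - 1) < m)) i := by
    intro i hi
    rw [List.mem_range] at hi
    simp only [Function.comp_def, hrect _ (getD_mem_of_lt Qss i hi), decide_eq_decide]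
    omega
  rw [List.filter_congr hfc]
  congr 1
  apply List.map_congr_left
  intro i hif
  rw [List.mem_filter, List.mem_range] at hif
  obtain ⟨hi, hg⟩ := hif
  rw [decide_eq_true_eq] at hg
  simp only [Function.comp_def]
  congr 1
  omega

theorem antiSum_zero_low (Qss : List (List Int)) (m : Nat)
    (hrect : ∀ r ∈ Qss, r.length = m) (k : Nat) (hk : k < 8 - Qss.length) :
    antiSum Qss k = 0 := by
  unfold antiSum
  rw [enumN_eq, List.filter_map]
  have : List.filter ((fun p : Nat × List Int => decide (7 - p.1 ≤ k ∧ k < (7 - p.1) + p.2.length)) ∘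
      (fun i => ((0 + i : Nat), Qss.getD i []))) (List.range Qss.length) = [] := by
    rw [List.filter_eq_nil_iff]
    intro i hi
    rw [List.mem_range] at hi
    simp only [Function.comp_def, hrect _ (getD_mem_of_lt Qss i hi), decide_eq_true_eq]
    omega
  rw [this]
  simp

-- ===== VERDICT (by name: the statement is the Claim_ definition above) =====
theorem check_spec : Claim_equal_check := by
  intro Qss _ hpre
  obtain ⟨hne, hshape⟩ := hpre
  show check Qss = check_alt Qss
  have e1 := maxI_map_iff Qss List.sum hne
  by_cases hrows : ∀ r ∈ Qss, r.sum ≤ 1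
  case neg =>
    -- some row sum exceeds 1: both programs answer false at the row stage
    have hA : check Qss = false := by
      unfold check
      rw [if_pos (e1.mpr hrows)]
    have hB : check_alt Qss = false := by
      unfold check_alt
      rw [if_pos ?_]
      push_neg at hrows
      obtain ⟨r, hr, hgt⟩ := hrows
      simp only [List.any_eq_true, decide_eq_true_eq]
      exact ⟨r, hr, hgt⟩
    rw [hA, hB]
  case pos =>
    -- all row sums at most 1: Pre_ forces a rectangular board of at most 8 nonempty rows
    have hrect' : Qss.length ≤ 8 ∧ (∀ r ∈ Qss, r.length = (Qss.headD []).length) ∧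
        Qss.headD [] ≠ [] := by
      rcases hshape with h | ⟨r, hr⟩
      · exact h
      · exact absurd (hrows r hr.1) (not_le.mpr hr.2)
    obtain ⟨h8, hrect, hrow⟩ := hrect'
    set n := Qss.length with hn
    set m := (Qss.headD []).length with hm
    have hn1 : 1 ≤ n := by
      cases Qss with
      | nil => exact absurd rfl hne
      | cons a t => simp [hn]
    have hm1 : 1 ≤ m := by
      rw [hm]
      cases Qss with
      | nil => exact absurd rfl hne
      | cons a t =>
        simp only [List.headD_cons] at hrow ⊢
        cases a with
        | nil => exact absurd rfl hrow
        | cons x xs => simp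
    have hminrow : minND (Qss.map List.length) = m := by
      have hmem := minND_mem (Qss.map List.length) (by simpa using hne)
      simp only [List.mem_map] at hmem
      obtain ⟨r, hr, he⟩ := hmem
      rw [← he, hrect r hr]
    have hminpad : minND ((enumN 0 Qss).map (fun p => p.2.length + max p.1 7)) = m + 7 := by
      have hmem := minND_mem ((enumN 0 Qss).map (fun p => p.2.length + max p.1 7))
        (by simpa using enumN_ne_nil 0 Qss hne)
      simp only [List.mem_map] at hmem
      obtain ⟨p, hp, he⟩ := hmem
      rw [enumN_eq] at hp
      simp only [List.mem_map, List.mem_range] at hp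
      obtain ⟨i, hi, rfl⟩ := hp
      simp only at he
      rw [← he, hrect _ (getD_mem_of_lt Qss i hi)]
      omega
    -- A (past its row stage) as a three-way conjunction
    have hA : check Qss = true ↔
        ((∀ j ∈ List.range m, colSum Qss j ≤ 1) ∧
         (∀ k ∈ List.range (m + 7), diagSum Qss k ≤ 1) ∧
         (∀ k ∈ List.range (m + 7), antiSum Qss k ≤ 1)) := by
      have e2 : (1 < pyMaxI ((pyZipT Qss).map List.sum)) ↔
          ¬ ∀ j ∈ List.range m, colSum Qss j ≤ 1 := by
        rw [cols_eq, hminrow]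
        exact maxI_map_iff _ _ (by simp [List.range_eq_nil]; omega)
      have e3 : (1 < pyMaxI ((pyZipT (padL Qss)).map List.sum)) ↔
          ¬ ∀ k ∈ List.range (m + 7), diagSum Qss k ≤ 1 := by
        rw [diags_eq, hminpad]
        exact maxI_map_iff _ _ (by simp [List.range_eq_nil])
      have e4 : (1 < pyMaxI ((pyZipT (padR Qss)).map List.sum)) ↔
          ¬ ∀ k ∈ List.range (m + 7), antiSum Qss k ≤ 1 := by
        rw [antis_eq, hminpad]
        exact maxI_map_iff _ _ (by simp [List.range_eq_nil])
      unfold check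
      rw [if_neg (by rw [e1]; exact not_not_intro hrows)]
      split_ifs with h2 h3 h4
      · simp only [false_iff]; rw [e2] at h2; tauto
      · simp only [false_iff]; rw [e3] at h3; tauto
      · simp only [false_iff]; rw [e4] at h4; tauto
      · simp only [true_iff]
        rw [e2, not_not] at h2
        rw [e3, not_not] at h3
        rw [e4, not_not] at h4
        exact ⟨h2, h3, h4⟩
    -- B (past its row stage) as a three-way conjunction
    have hB : check_alt Qss = true ↔
        ((∀ j ∈ List.range m, colSum Qss j ≤ 1) ∧
         (∀ k ∈ List.range (n + m - 1), bDiagS Qss n m k ≤ 1) ∧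
         (∀ k ∈ List.range (n + m - 1), bAntiS Qss n m k ≤ 1)) := by
      unfold check_alt colSum bDiagS bAntiS
      rw [if_neg (by
        simp only [List.any_eq_true, decide_eq_true_eq, not_exists]
        intro r hpair
        exact absurd hpair.2 (not_lt.mpr (hrows r hpair.1)))]
      simp only [← hn, ← hm, Bool.and_eq_true, List.all_eq_true, List.mem_range,
        decide_eq_true_eq]
      tauto

    -- the diagonal components agree
    have hdiag : (∀ k ∈ List.range (m + 7), diagSum Qss k ≤ 1) ↔
        (∀ k ∈ List.range (n + m - 1), bDiagS Qss n m k ≤ 1) := by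
      constructor
      · intro h k hk
        rw [List.mem_range] at hk
        rw [← diagSum_eq_bDiagS Qss m hrect k]
        exact h k (List.mem_range.mpr (by omega))
      · intro h k hk
        rw [List.mem_range] at hk
        by_cases hlt : k < n + m - 1
        · rw [diagSum_eq_bDiagS Qss m hrect k]
          exact h k (List.mem_range.mpr hlt)
        · rw [diagSum_zero Qss m hrect k (by omega)]
          norm_num
    have hanti : (∀ k ∈ List.range (m + 7), antiSum Qss k ≤ 1) ↔
        (∀ k ∈ List.range (n + m - 1), bAntiS Qss n m k ≤ 1) := by
      constructor
      · intro h k hk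
        rw [List.mem_range] at hk
        rw [← antiSum_eq_bAntiS Qss m hrect h8 hn1 k]
        exact h (k + (8 - n)) (List.mem_range.mpr (by omega))
      · intro h k hk
        rw [List.mem_range] at hk
        by_cases hlt : k < 8 - n
        · rw [antiSum_zero_low Qss m hrect k hlt]
          norm_num
        · have hk8 : k = (k - (8 - n)) + (8 - n) := by omega
          rw [hk8, antiSum_eq_bAntiS Qss m hrect h8 hn1 (k - (8 - n))]
          exact h (k - (8 - n)) (List.mem_range.mpr (by omega))
    have hiff : check Qss = true ↔ check_alt Qss = true := by
      rw [hA, hB, hdiag, hanti]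
    cases hchk : check Qss <;> cases halt : check_alt Qss <;> simp_all
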